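-- pv_equiv track=rewrite | github.com/mehdiforoozandeh/EpiDenoise | data_utils.py | assign_chromosomes_to_ranks
-- ===== SOURCE A (Python) =====
-- def assign_chromosomes_to_ranks(chromosomes, num_ranks):
--     """Assign chromosomes to different ranks for balanced loading."""
--     assignments = {}
--     for i, chromosome in enumerate(chromosomes):
--         rank = i % num_ranks
--         if rank not in assignments:
--             assignments[rank] = []
--         assignments[rank].append(chromosome)
--     return assignments
-- ===== SOURCE B (Python) =====
-- def assign_chromosomes_to_ranks(chromosomes, num_ranks):
--     """Assign chromosomes to different ranks for balanced loading."""
--     if not chromosomes: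
--         return {}
--     q, rem = divmod(len(chromosomes), num_ranks)
--     ranks_used = num_ranks if q > 0 else rem
--     assignments = {}
--     for r in range(ranks_used):
--         bucket = []
--         i = r
--         while i < len(chromosomes):
--             bucket.append(chromosomes[i])
--             i += num_ranks
--         assignments[r] = bucket
--     return assignments
-- ===== Notes on version B (the rewrite author's own statement) =====
-- stated objective: alternative
-- what changed: Instead of A's single pass that dispatches each element to bucket i % num_ranks in a dict, B computes the number of occupied ranks once with divmod and then gathers each rank's bucket with a strided index walk (r, r+num_ranks, ...), inserting buckets in increasing rank order.
-- outside the precondition, e.g. on assign_chromosomes_to_ranks(['a', 'b'], -2): A returns {0: ['a'], -1: ['b']}, B returns {}; on assign_chromosomes_to_ranks([], -2): A returns {}, B returns {}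
import Mathlib
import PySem

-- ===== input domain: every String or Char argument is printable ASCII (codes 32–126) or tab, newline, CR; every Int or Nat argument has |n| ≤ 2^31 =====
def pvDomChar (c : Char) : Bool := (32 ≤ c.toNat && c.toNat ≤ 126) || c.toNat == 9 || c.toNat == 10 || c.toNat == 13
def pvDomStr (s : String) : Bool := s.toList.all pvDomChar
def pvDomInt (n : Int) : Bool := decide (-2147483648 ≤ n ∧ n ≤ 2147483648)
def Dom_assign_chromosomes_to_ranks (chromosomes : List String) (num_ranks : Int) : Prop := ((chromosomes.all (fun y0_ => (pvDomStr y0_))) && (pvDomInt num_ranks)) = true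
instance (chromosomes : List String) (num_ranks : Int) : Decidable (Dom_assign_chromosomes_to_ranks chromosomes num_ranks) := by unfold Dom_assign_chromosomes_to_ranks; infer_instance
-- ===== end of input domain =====

-- B replaces A's single-pass modulo dispatch into a dict by a per-rank strided gather
-- (rank r collects indices r, r+num_ranks, …), same values, same key order; objective: alternative decomposition.

-- ===== PORT A =====
def assign_chromosomes_to_ranks (chromosomes : List String) (num_ranks : Int) : List (Int × List String) :=
  ((PySem.List.enumerate chromosomes 0).foldl
    (fun d p =>
      let rank := PySem.Int.mod p.1 num_ranks
      let d := if d.contains rank = false then d.insert rank ([] : List String) else d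
      d.modify rank [] (fun v => v ++ [p.2]))
    PySem.Dict.empty).items

-- ===== PORT B =====
-- B helper: the 'while i < len(chromosomes): bucket.append(chromosomes[i]); i += num_ranks' loop.
-- 'max step 1' is only for termination: it is exact at every call site, where step = num_ranks ≥ 1
-- (for num_ranks ≤ 0 the surrounding range() loop is empty and the helper is never invoked; the Python
-- while loop would not terminate for step = 0).
def pvGather (xs : List String) (step : Nat) (i : Nat) (out : List String) : List String :=
  if h : i < xs.length then pvGather xs step (i + max step 1) (out ++ [xs[i]]) else out
termination_by xs.length - i
decreasing_by omega

def assign_chromosomes_to_ranks_alt (chromosomes : List String) (num_ranks : Int) : List (Int × List String) :=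
  if chromosomes = [] then []
  else
    match PySem.Int.divmod? (chromosomes.length : Int) num_ranks with
    | none => []  -- divmod raises ZeroDivisionError here in Python (num_ranks = 0, non-empty input); outside Pre_
    | some (q, rem) =>
      let ranks_used := if 0 < q then num_ranks else rem
      ((PySem.List.pyRange 0 ranks_used 1).foldl
        (fun d r => d.insert r (pvGather chromosomes num_ranks.toNat r.toNat []))
        PySem.Dict.empty).items

-- ===== PRECONDITION & SPEC =====
-- Pre_ excludes num_ranks ≤ 0: for num_ranks = 0 both programs raise ZeroDivisionError on non-empty
-- input, and for num_ranks < 0 A's floor-modulo produces negative "rank" keys, an artefact outside the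
-- function's purpose (a rank count is positive), which B does not reproduce (B returns {} there).
def Pre_assign_chromosomes_to_ranks (chromosomes : List String) (num_ranks : Int) : Prop :=
  1 ≤ num_ranks
instance (chromosomes : List String) (num_ranks : Int) : Decidable (Pre_assign_chromosomes_to_ranks chromosomes num_ranks) := by unfold Pre_assign_chromosomes_to_ranks; infer_instance

def pvWitness_assign_chromosomes_to_ranks : List String × Int := (["chr1", "chr2", "chr3"], 2)

def Spec_assign_chromosomes_to_ranks (chromosomes : List String) (num_ranks : Int) (out : List (Int × List String)) : Prop := out = assign_chromosomes_to_ranks_alt chromosomes num_ranks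
instance (chromosomes : List String) (num_ranks : Int) (out : List (Int × List String)) : Decidable (Spec_assign_chromosomes_to_ranks chromosomes num_ranks out) := by unfold Spec_assign_chromosomes_to_ranks; infer_instance

-- ===== CLAIM (what is proved, stated in full; the proofs are below) =====
def Claim_equal_assign_chromosomes_to_ranks : Prop := ∀ (chromosomes : List String) (num_ranks : Int), Dom_assign_chromosomes_to_ranks chromosomes num_ranks → Pre_assign_chromosomes_to_ranks chromosomes num_ranks → Spec_assign_chromosomes_to_ranks chromosomes num_ranks (assign_chromosomes_to_ranks chromosomes num_ranks)

-- ===== LEMMAS AND PROOFS =====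

-- bucket of rank r: what B's while loop collects starting at index r
def pvBucket (xs : List String) (n : Nat) (r : Nat) : List String := pvGather xs n r []

-- the common shape of both results: ranks 0 .. min n len - 1, each with its strided bucket
def pvSpecItems (xs : List String) (n : Nat) : List (Int × List String) :=
  (List.range (min n xs.length)).map (fun (r : Nat) => ((r : Int), pvBucket xs n r))

theorem pvDict_eq_mk {d : PySem.Dict Int (List String)} {l : List (Int × List String)}
    (h : d.items = l) : d = PySem.Dict.mk l := by
  cases d
  exact congrArg PySem.Dict.mk h

theorem pvItems_mk (l : List (Int × List String)) : (PySem.Dict.mk l).items = l := rfl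

theorem pvGather_end (xs : List String) (n i : Nat) (h : xs.length ≤ i) :
    pvGather xs n i [] = [] := by
  rw [pvGather]
  simp only [dif_neg (by omega : ¬ i < xs.length)]

theorem pvGather_acc (xs : List String) (n : Nat) :
    ∀ (k i : Nat), xs.length - i ≤ k → ∀ out, pvGather xs n i out = out ++ pvGather xs n i []
  | 0, i, h, out => by
    have hi : ¬ i < xs.length := by omega
    rw [pvGather]
    conv_rhs => rw [pvGather]
    simp [hi]
  | (k+1), i, h, out => by
    by_cases hi : i < xs.length
    · rw [pvGather]
      conv_rhs => rw [pvGather]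
      simp only [hi, dif_pos]
      rw [pvGather_acc xs n k (i + max n 1) (by omega) (out ++ [xs[i]]),
          pvGather_acc xs n k (i + max n 1) (by omega) ([] ++ [xs[i]])]
      simp
    · rw [pvGather]
      conv_rhs => rw [pvGather]
      simp [hi]

theorem pvGather_acc' (xs : List String) (n i : Nat) (out : List String) :
    pvGather xs n i out = out ++ pvGather xs n i [] :=
  pvGather_acc xs n xs.length i (by omega) out

theorem pvGather_last (xs : List String) (x : String) (n : Nat) :
    pvGather (xs ++ [x]) n xs.length [] = [x] := by
  conv_lhs => rw [pvGather]
  have hlt : xs.length < (xs ++ [x]).length := by simp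
  simp only [hlt, dif_pos, List.nil_append]
  rw [List.getElem_concat_length rfl]
  rw [pvGather_acc']
  rw [pvGather_end _ _ _ (by simp)]
  simp

theorem pvGather_snoc (xs : List String) (x : String) (n : Nat) (hn : 1 ≤ n) :
    ∀ (k i : Nat), i ≤ xs.length → xs.length - i ≤ k →
      pvGather (xs ++ [x]) n i [] =
        pvGather xs n i [] ++ (if (xs.length - i) % n = 0 then [x] else [])
  | 0, i, hi, hk => by
    have hieq : i = xs.length := by omega
    subst hieq
    rw [pvGather_last, pvGather_end _ _ _ (le_refl _)]
    simp
  | (k+1), i, hi, hk => by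
    by_cases hilt : i < xs.length
    · have hmax : max n 1 = n := by omega
      have hi' : i < (xs ++ [x]).length := by simp; omega
      conv_lhs => rw [pvGather]
      simp only [hi', dif_pos, hmax, List.nil_append]
      rw [List.getElem_append_left hilt]
      rw [pvGather_acc']
      conv_rhs => rw [pvGather]
      simp only [hilt, dif_pos, hmax, List.nil_append]
      rw [pvGather_acc' xs n (i + n) [xs[i]]]
      by_cases hin : i + n ≤ xs.length
      · rw [pvGather_snoc xs x n hn k (i + n) hin (by omega)]
        have he : xs.length - i = (xs.length - (i + n)) + n := by omega
        rw [he, Nat.add_mod_right]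
        simp
      · rw [pvGather_end (xs ++ [x]) n (i + n) (by simp; omega)]
        rw [pvGather_end xs n (i + n) (by omega)]
        have h3 : (xs.length - i) % n ≠ 0 := by
          rw [Nat.mod_eq_of_lt (by omega)]
          omega
        simp [h3]
    · have hieq : i = xs.length := by omega
      subst hieq
      rw [pvGather_last, pvGather_end _ _ _ (le_refl _)]
      simp

theorem pvBucket_snoc (xs : List String) (x : String) (n : Nat) (hn : 1 ≤ n) (r : Nat)
    (hr : r ≤ xs.length) :
    pvBucket (xs ++ [x]) n r =
      pvBucket xs n r ++ (if (xs.length - r) % n = 0 then [x] else []) :=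
  pvGather_snoc xs x n hn xs.length r hr (by omega)

theorem pvMod_sub (L r n : Nat) (hr : r < n) (hrL : r ≤ L) :
    (L - r) % n = 0 ↔ L % n = r := by
  constructor
  · intro h
    obtain ⟨q, hq⟩ := Nat.dvd_of_mod_eq_zero h
    have hL : L = n * q + r := by omega
    subst hL
    simp [Nat.mul_add_mod, Nat.mod_eq_of_lt hr]
  · intro h
    have hdm := Nat.div_add_mod L n
    have hs : L - r = n * (L / n) := by omega
    simp [hs, Nat.mul_mod_right]

theorem pvSpecKeysNodup (xs : List String) (n : Nat) :
    ((pvSpecItems xs n).map Prod.fst).Nodup := by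
  simp only [pvSpecItems, List.map_map]
  refine List.Nodup.map ?_ List.nodup_range
  intro a b h
  simp only [Function.comp, Prod.mk.injEq] at h
  exact_mod_cast h

theorem pvSpecGetD (xs : List String) (n : Nat) (r : Nat) (hr : r < min n xs.length) :
    (PySem.Dict.mk (pvSpecItems xs n)).getD ((r : Int)) [] = pvBucket xs n r := by
  apply PySem.Dict.getD_of_mem_items
  · exact List.mem_map.mpr ⟨r, List.mem_range.mpr hr, rfl⟩
  · rw [PySem.Dict.keys_mk]
    exact pvSpecKeysNodup xs n

theorem pvSpecContains (xs : List String) (n : Nat) (v : Nat) :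
    (PySem.Dict.mk (pvSpecItems xs n)).contains ((v : Int)) =
      decide (v < min n xs.length) := by
  rw [PySem.Dict.contains_mk]
  by_cases h : v < min n xs.length
  · simp only [h, decide_true]
    rw [List.any_eq_true]
    exact ⟨((v : Int), pvBucket xs n v), List.mem_map.mpr ⟨v, List.mem_range.mpr h, rfl⟩,
      by simp⟩
  · simp only [h, decide_false]
    rw [List.any_eq_false]
    intro p hp
    obtain ⟨r, hrm, rfl⟩ := List.mem_map.mp hp
    have hr := List.mem_range.mp hrm
    intro hc
    simp only [beq_iff_eq, Nat.cast_inj] at hc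
    omega

theorem pvFoldB_eq (xs : List String) (n : Nat) :
    ∀ (m : Nat),
    (((List.range m).map (fun (k : Nat) => (k : Int))).foldl
      (fun d r => d.insert r (pvGather xs n r.toNat []))
      (PySem.Dict.empty : PySem.Dict Int (List String))) =
      PySem.Dict.mk ((List.range m).map (fun (r : Nat) => ((r : Int), pvBucket xs n r)))
  | 0 => by simp [PySem.Dict.empty]
  | (m+1) => by
    rw [List.range_succ]
    simp only [List.map_append, List.foldl_append, List.map_cons, List.map_nil,
      List.foldl_cons, List.foldl_nil]
    rw [pvFoldB_eq xs n m]
    have hc : (PySem.Dict.mk ((List.range m).map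
        (fun (r : Nat) => ((r : Int), pvBucket xs n r)))).contains ((m : Int)) = false := by
      rw [PySem.Dict.contains_mk, List.any_eq_false]
      intro p hp
      obtain ⟨r, hrm, rfl⟩ := List.mem_map.mp hp
      have hr := List.mem_range.mp hrm
      intro hcast
      simp only [beq_iff_eq, Nat.cast_inj] at hcast
      omega
    apply pvDict_eq_mk
    rw [PySem.Dict.items_insert_of_not_contains _ _ hc]
    simp [pvBucket]

theorem pvStepA (xs : List String) (x : String) (n : Nat) (hn : 1 ≤ n) :
    (let d := PySem.Dict.mk (pvSpecItems xs n)
     let rank := PySem.Int.mod ((xs.length : Nat) : Int) ((n : Nat) : Int)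
     let d := if d.contains rank = false then d.insert rank ([] : List String) else d
     d.modify rank [] (fun v => v ++ [x])) = PySem.Dict.mk (pvSpecItems (xs ++ [x]) n) := by
  simp only []
  rw [PySem.Int.mod_natCast]
  by_cases hL : xs.length < n
  · -- new rank: L % n = L, key absent, gets inserted at the end
    have hmodL : xs.length % n = xs.length := Nat.mod_eq_of_lt hL
    have hminL : min n xs.length = xs.length := Nat.min_eq_right (le_of_lt hL)
    rw [hmodL]
    have hcont : (PySem.Dict.mk (pvSpecItems xs n)).contains ((xs.length : Int)) = false := by
      rw [pvSpecContains, hminL]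
      simp
    rw [hcont]
    simp only [Bool.false_eq_true, if_true, reduceIte]
    set d1 := (PySem.Dict.mk (pvSpecItems xs n)).insert ((xs.length : Int)) ([] : List String)
      with hd1
    have hd1items : d1.items = pvSpecItems xs n ++ [((xs.length : Int), ([] : List String))] :=
      PySem.Dict.items_insert_of_not_contains _ _ hcont
    have hd1mk : d1 = PySem.Dict.mk
        (pvSpecItems xs n ++ [((xs.length : Int), ([] : List String))]) := pvDict_eq_mk hd1items
    have hkeys1 : ((pvSpecItems xs n ++
        [((xs.length : Int), ([] : List String))]).map Prod.fst).Nodup := by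
      rw [List.map_append]
      apply List.Nodup.append (pvSpecKeysNodup xs n) (by simp)
      intro a ha hb
      obtain ⟨p, hp, rfl⟩ := List.mem_map.mp ha
      obtain ⟨r, hrm, rfl⟩ := List.mem_map.mp hp
      have hr := List.mem_range.mp hrm
      simp only [List.map_cons, List.map_nil, List.mem_singleton] at hb
      have : r = xs.length := by exact_mod_cast hb
      omega
    have hgetD : d1.getD ((xs.length : Int)) [] = [] := by
      rw [hd1mk]
      apply PySem.Dict.getD_of_mem_items
      · simp
      · rw [PySem.Dict.keys_mk]; exact hkeys1
    have hcont1 : d1.contains ((xs.length : Int)) = true := by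
      rw [hd1mk, PySem.Dict.contains_mk, List.any_eq_true]
      exact ⟨((xs.length : Int), []), by simp, by simp⟩
    show d1.modify ((xs.length : Int)) [] (fun v => v ++ [x]) = _
    rw [PySem.Dict.modify, hgetD]
    apply pvDict_eq_mk
    rw [PySem.Dict.items_insert_of_contains _ _ hcont1, hd1items]
    rw [List.map_append]
    have hlen : (xs ++ [x]).length = xs.length + 1 := by simp
    have hmin' : min n (xs.length + 1) = xs.length + 1 := Nat.min_eq_right (by omega)
    conv_rhs => rw [pvSpecItems, hlen, hmin', List.range_succ, List.map_append]
    congr 1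
    · conv_lhs => rw [pvSpecItems, hminL]
      rw [List.map_map]
      apply List.map_congr_left
      intro r hrm
      have hr := List.mem_range.mp hrm
      have hb := pvBucket_snoc xs x n hn r (by omega)
      have hne : (xs.length - r) % n ≠ 0 := by
        rw [Nat.mod_eq_of_lt (by omega)]
        omega
      have hneq : (((r : Nat) : Int) == ((xs.length : Int))) = false := by
        simp only [beq_eq_false_iff_ne, ne_eq, Nat.cast_inj]
        omega
      simp [Function.comp, hb, hne, hneq]
    · simp [pvBucket, pvGather_last]
  · -- existing rank: L % n < n ≤ L, key present, bucket extended in place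
    have hnL : n ≤ xs.length := by omega
    have hminL : min n xs.length = n := Nat.min_eq_left hnL
    have hmodlt : xs.length % n < n := Nat.mod_lt _ (by omega)
    have hcont : (PySem.Dict.mk (pvSpecItems xs n)).contains
        (((xs.length % n : Nat) : Int)) = true := by
      rw [pvSpecContains, hminL]
      simp [hmodlt]
    rw [hcont]
    simp only [Bool.true_eq_false, reduceIte]
    rw [PySem.Dict.modify]
    rw [pvSpecGetD xs n (xs.length % n) (by omega)]
    apply pvDict_eq_mk
    rw [PySem.Dict.items_insert_of_contains _ _ hcont, pvItems_mk]
    have hlen : (xs ++ [x]).length = xs.length + 1 := by simp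
    have hmin' : min n (xs.length + 1) = n := Nat.min_eq_left (by omega)
    conv_rhs => rw [pvSpecItems, hlen, hmin']
    conv_lhs => rw [pvSpecItems, hminL]
    rw [List.map_map]
    apply List.map_congr_left
    intro r hrm
    have hr := List.mem_range.mp hrm
    have hb := pvBucket_snoc xs x n hn r (by omega)
    by_cases hreq : r = xs.length % n
    · have hz : (xs.length - r) % n = 0 := (pvMod_sub xs.length r n hr (by omega)).mpr hreq.symm
      have hc : ((r : Nat) : Int) = ((xs.length % n : Nat) : Int) := by exact_mod_cast hreq
      simp only [Function.comp]
      rw [hb, if_pos hz]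
      simp [hc, hreq]
    · have hz : (xs.length - r) % n ≠ 0 := by
        intro hc
        exact hreq ((pvMod_sub xs.length r n hr (by omega)).mp hc).symm
      simp only [Function.comp, hb, hz, if_false, reduceIte, List.append_nil]
      simp only [Function.comp, beq_iff_eq, Nat.cast_inj]
      rw [if_neg hreq]

theorem pvFoldA_eq (xs : List String) (n : Nat) (hn : 1 ≤ n) :
    ((PySem.List.enumerate xs 0).foldl
      (fun d p =>
        let rank := PySem.Int.mod p.1 ((n : Nat) : Int)
        let d := if d.contains rank = false then d.insert rank ([] : List String) else d
        d.modify rank [] (fun v => v ++ [p.2]))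
      PySem.Dict.empty) = PySem.Dict.mk (pvSpecItems xs n) := by
  induction xs using List.reverseRecOn with
  | nil => simp [PySem.List.enumerate_nil, pvSpecItems, PySem.Dict.empty]
  | append_singleton xs x ih =>
    rw [PySem.List.enumerate_append, List.foldl_append, ih]
    simp only [PySem.List.enumerate_cons, PySem.List.enumerate_nil, List.foldl_cons,
      List.foldl_nil, zero_add]
    exact pvStepA xs x n hn

-- B's rank count 'num_ranks if q > 0 else rem' equals min num_ranks len (num_ranks ≥ 1)
theorem pvRanksUsed (L n : Nat) (hn : 1 ≤ n) :
    (if (0 : Int) < ((L / n : Nat) : Int) then ((n : Nat) : Int) else ((L % n : Nat) : Int)) =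
      ((min n L : Nat) : Int) := by
  by_cases h : n ≤ L
  · have hq : 1 ≤ L / n := (Nat.one_le_div_iff (by omega)).mpr h
    rw [if_pos (by exact_mod_cast hq : (0 : Int) < ((L / n : Nat) : Int)), Nat.min_eq_left h]
  · have hq : L / n = 0 := Nat.div_eq_of_lt (by omega)
    have hm : L % n = L := Nat.mod_eq_of_lt (by omega)
    have hneg : ¬ (0 : Int) < ((L / n : Nat) : Int) := by rw [hq]; simp
    rw [if_neg hneg, hm, Nat.min_eq_right (by omega : L ≤ n)]

-- ===== VERDICT (by name: the statement is the Claim_ definition above) =====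
theorem assign_chromosomes_to_ranks_spec : Claim_equal_assign_chromosomes_to_ranks := by
  intro xs num_ranks _hdom hpre
  unfold Spec_assign_chromosomes_to_ranks
  have h1 : 1 ≤ num_ranks := hpre
  obtain ⟨n, rfl⟩ : ∃ n : Nat, num_ranks = (n : Int) :=
    ⟨num_ranks.toNat, (Int.toNat_of_nonneg (by omega)).symm⟩
  have hn : 1 ≤ n := by exact_mod_cast h1
  unfold assign_chromosomes_to_ranks assign_chromosomes_to_ranks_alt
  rw [pvFoldA_eq xs n hn]
  by_cases hxs : xs = []
  · subst hxs
    simp [pvSpecItems, PySem.Dict.empty, PySem.Int.divmod?]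
  · have hnz : ((n : Nat) : Int) ≠ 0 := by exact_mod_cast (by omega : n ≠ 0)
    have hdm : PySem.Int.divmod? ((xs.length : Nat) : Int) ((n : Nat) : Int)
        = some (((xs.length / n : Nat) : Int), ((xs.length % n : Nat) : Int)) := by
      unfold PySem.Int.divmod?
      rw [if_neg hnz]
      rw [show (((xs.length : Nat) : Int).fdiv ((n : Nat) : Int))
            = PySem.Int.floordiv ((xs.length : Nat) : Int) ((n : Nat) : Int) from rfl,
          show (((xs.length : Nat) : Int).fmod ((n : Nat) : Int))
            = PySem.Int.mod ((xs.length : Nat) : Int) ((n : Nat) : Int) from rfl,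
          PySem.Int.floordiv_natCast, PySem.Int.mod_natCast]
    simp only [if_neg hxs, hdm]
    rw [pvRanksUsed xs.length n hn, PySem.List.pyRange_zero_nat]
    simp only [Int.toNat_natCast]
    rw [pvFoldB_eq xs n (min n xs.length)]
    rfl
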